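-- pv_equiv track=rewrite | github.com/symetryml/o11y | otel_etl/profiler/label_discovery.py | get_unique_labels
-- ===== SOURCE A (Python) =====
-- from typing import TypedDict
--
-- class LabelInfo(TypedDict):
--     """Information about a discovered label."""
--     name: str
--     metrics: list[str]  # Metrics that have this label
--
-- def get_unique_labels(
--     labels_by_family: dict[str, dict[str, LabelInfo]],
-- ) -> dict[str, list[str]]:
--     """Find labels unique to specific metric families.
--
--     Args:
--         labels_by_family: Output from discover_labels()
--
--     Returns:
--         Dict mapping family name to list of unique labels
--     """
--     all_labels: dict[str, list[str]] = {}
--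
--     for family_name, family_labels in labels_by_family.items():
--         for label_name in family_labels.keys():
--             if label_name not in all_labels:
--                 all_labels[label_name] = []
--             all_labels[label_name].append(family_name)
--
--     result: dict[str, list[str]] = {}
--
--     for label_name, families in all_labels.items():
--         if len(families) == 1:
--             family = families[0]
--             if family not in result:
--                 result[family] = []
--             result[family].append(label_name)
--
--     return result
-- ===== SOURCE B (Python) =====
-- def get_unique_labels(labels_by_family):
--     """Find labels unique to specific metric families.
--
--     One counting pass over all label names, then a second pass over the
--     original nested structure emitting count-1 labels in place.
--     """
--     counts = {}
--     for family_labels in labels_by_family.values():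
--         for label_name in family_labels:
--             counts[label_name] = counts.get(label_name, 0) + 1
--
--     result = {}
--     for family_name, family_labels in labels_by_family.items():
--         for label_name in family_labels:
--             if counts[label_name] == 1:
--                 result.setdefault(family_name, []).append(label_name)
--     return result
-- ===== Notes on version B (the rewrite author's own statement) =====
-- stated objective: simpler
-- what changed: Replaces A's inverted label-to-families list index and its pass over that index with a flat occurrence counter plus a second pass over the original nested dict that emits count-1 labels in place.
import Mathlib
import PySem

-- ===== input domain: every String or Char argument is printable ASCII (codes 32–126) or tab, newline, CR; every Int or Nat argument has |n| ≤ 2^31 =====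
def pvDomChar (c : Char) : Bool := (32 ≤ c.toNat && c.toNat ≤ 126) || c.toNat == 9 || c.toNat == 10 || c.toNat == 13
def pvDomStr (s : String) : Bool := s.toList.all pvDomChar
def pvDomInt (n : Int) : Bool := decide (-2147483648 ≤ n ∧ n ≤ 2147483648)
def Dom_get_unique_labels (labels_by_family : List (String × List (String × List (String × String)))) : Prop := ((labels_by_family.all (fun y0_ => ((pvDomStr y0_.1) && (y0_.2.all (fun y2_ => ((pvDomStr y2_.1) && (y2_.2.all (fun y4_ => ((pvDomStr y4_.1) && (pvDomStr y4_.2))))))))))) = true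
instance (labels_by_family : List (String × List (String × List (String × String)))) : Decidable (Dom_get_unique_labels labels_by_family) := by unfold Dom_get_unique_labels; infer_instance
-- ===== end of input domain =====

-- B replaces A's inverted label->families index and second pass over that index by a flat
-- occurrence counter plus a second pass over the original nested structure (objective: simpler).

-- ===== PORT A =====
-- all_labels loop: 'if label_name not in all_labels: all_labels[label_name] = []' then
-- 'all_labels[label_name].append(family_name)' (append ported as insert of getD ++ [·]).
def pyA_all_labels (labels_by_family : List (String × List (String × List (String × String)))) : PySem.Dict String (List String) :=
  labels_by_family.foldl
    (fun d fam =>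
      fam.2.foldl
        (fun d lbl =>
          let d := if d.contains lbl.1 then d else d.insert lbl.1 ([] : List String)
          d.insert lbl.1 (d.getD lbl.1 [] ++ [fam.1]))
        d)
    PySem.Dict.empty

def get_unique_labels (labels_by_family : List (String × List (String × List (String × String)))) : List (String × List String) :=
  ((pyA_all_labels labels_by_family).items.foldl
    (fun r it =>
      if it.2.length = 1 then
        -- family = families[0]; in range because the length-1 test just passed
        let family := it.2.headD ""
        let r := if r.contains family then r else r.insert family ([] : List String)
        r.insert family (r.getD family [] ++ [it.1])
      else r)
    PySem.Dict.empty).items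

-- ===== PORT B =====
-- counts[label] = counts.get(label, 0) + 1
def pyB_counts (labels_by_family : List (String × List (String × List (String × String)))) : PySem.Dict String Int :=
  labels_by_family.foldl
    (fun d fam => fam.2.foldl (fun d lbl => d.insert lbl.1 (d.getD lbl.1 0 + 1)) d)
    PySem.Dict.empty

-- second pass: 'result.setdefault(family_name, []).append(label_name)'
def get_unique_labels_alt (labels_by_family : List (String × List (String × List (String × String)))) : List (String × List String) :=
  (labels_by_family.foldl
    (fun r fam =>
      fam.2.foldl
        (fun r lbl =>
          if (pyB_counts labels_by_family).getD lbl.1 0 = 1 then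
            (r.setdefault fam.1 []).modify fam.1 [] (· ++ [lbl.1])
          else r)
        r)
    PySem.Dict.empty).items

-- ===== PRECONDITION & SPEC =====
def Spec_get_unique_labels (labels_by_family : List (String × List (String × List (String × String)))) (out : List (String × List String)) : Prop := out = get_unique_labels_alt labels_by_family
instance (labels_by_family : List (String × List (String × List (String × String)))) (out : List (String × List String)) : Decidable (Spec_get_unique_labels labels_by_family out) := by unfold Spec_get_unique_labels; infer_instance

-- ===== CLAIM (what is proved, stated in full; the proofs are below) =====
def Claim_equal_get_unique_labels : Prop := ∀ (labels_by_family : List (String × List (String × List (String × String)))), Dom_get_unique_labels labels_by_family → Spec_get_unique_labels labels_by_family (get_unique_labels labels_by_family)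

-- ===== LEMMAS AND PROOFS =====

-- the flattened (label, family) occurrence list of the input
def pvOcc (lbf : List (String × List (String × List (String × String)))) : List (String × String) :=
  lbf.flatMap (fun fam => fam.2.map (fun lbl => (lbl.1, fam.1)))

theorem foldl_inner {α β γ : Type} (l : List α) (f : α → List β) (g : γ → β → γ) (init : γ) :
    l.foldl (fun acc a => (f a).foldl g acc) init = (l.flatMap f).foldl g init := by
  induction l generalizing init with
  | nil => rfl
  | cons a t ih => simp only [List.foldl_cons, List.flatMap_cons, List.foldl_append, ih]
theorem abody (d : PySem.Dict String (List String)) (k v : String) :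
    (if d.contains k then d else d.insert k ([] : List String)).insert k
      ((if d.contains k then d else d.insert k ([] : List String)).getD k [] ++ [v])
    = d.modify k [] (· ++ [v]) := by
  by_cases hc : d.contains k = true
  · simp only [hc, if_pos]
    rfl
  · have hc' : d.contains k = false := by simpa using hc
    simp only [hc', Bool.false_eq_true, if_neg, not_false_iff]
    rw [PySem.Dict.getD_insert_self, PySem.Dict.insert_insert_self]
    show d.insert k ([] ++ [v]) = d.insert k (d.getD k [] ++ [v])
    rw [PySem.Dict.getD_of_not_contains (h := hc')]

theorem bbody (d : PySem.Dict String (List String)) (k v : String) :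
    (d.setdefault k []).modify k [] (· ++ [v]) = d.modify k [] (· ++ [v]) := by
  by_cases hc : d.contains k = true
  · rw [PySem.Dict.setdefault_of_contains (h := hc)]
  · have hc' : d.contains k = false := by simpa using hc
    rw [PySem.Dict.setdefault_of_not_contains (h := hc')]
    show (d.insert k []).insert k ((d.insert k []).getD k [] ++ [v]) = _
    rw [PySem.Dict.getD_insert_self, PySem.Dict.insert_insert_self]
    show d.insert k ([] ++ [v]) = d.insert k (d.getD k [] ++ [v])
    rw [PySem.Dict.getD_of_not_contains (h := hc')]

theorem foldl_if_filter {β γ δ : Type} (l : List β) (p : β → Prop) [DecidablePred p]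
    (h : β → δ) (g : γ → δ → γ) (init : γ) :
    l.foldl (fun r x => if p x then g r (h x) else r) init
      = ((l.filter (fun x => decide (p x))).map h).foldl g init := by
  induction l generalizing init with
  | nil => rfl
  | cons a t ih =>
    by_cases hp : p a <;> simp [hp, ih]

theorem allA (lbf : List (String × List (String × List (String × String)))) :
    pyA_all_labels lbf
      = (pvOcc lbf).foldl (fun d o => d.modify o.1 [] (· ++ [o.2])) PySem.Dict.empty := by
  unfold pyA_all_labels pvOcc
  rw [← foldl_inner]
  congr 1
  funext d fam
  rw [List.foldl_map]
  congr 1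
  funext d lbl
  exact abody d lbl.1 fam.1

theorem countsB (lbf : List (String × List (String × List (String × String)))) (x : String) :
    (pyB_counts lbf).getD x 0 = (((pvOcc lbf).map (·.1)).count x : Int) := by
  have h1 : pyB_counts lbf
      = (lbf.flatMap (fun fam => fam.2.map (·.1))).foldl
          (fun d y => d.insert y (d.getD y 0 + 1)) PySem.Dict.empty := by
    unfold pyB_counts
    rw [← foldl_inner]
    congr 1
    funext d fam
    rw [List.foldl_map]
  have h2 : (pvOcc lbf).map (·.1) = lbf.flatMap (fun fam => fam.2.map (·.1)) := by
    simp [pvOcc, List.map_flatMap, List.map_map, Function.comp_def]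
  rw [h1, h2, PySem.Dict.getD_foldl_insert_add_one, PySem.Dict.getD_empty, zero_add]
theorem ofList_filter_count_one (m : List String) (c : String → Bool)
    (h : ∀ x, c x = true → m.count x ≤ 1) :
    (PySem.Set.ofList m).filter c = m.filter c := by
  induction m using List.reverseRecOn with
  | nil => rfl
  | append_singleton t a ih =>
    have ht : ∀ x, c x = true → t.count x ≤ 1 := by
      intro x hx
      have := h x hx
      simp only [List.count_append] at this
      omega
    rw [PySem.Set.ofList_append_singleton, PySem.Set.add_eq_ite]
    by_cases hm : a ∈ PySem.Set.ofList t
    · have ham : a ∈ t := (PySem.Set.mem_ofList _ _).mp hm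
      have hca : c a = false := by
        by_contra hb
        have hca : c a = true := by simpa using hb
        have := h a hca
        have h2 : 1 ≤ t.count a := List.one_le_count_iff.mpr ham
        simp only [List.count_append, List.count_singleton, BEq.rfl, if_pos] at this
        omega
      simp [hm, ih ht, List.filter_append, hca]
    · simp [hm, List.filter_append, ih ht]
theorem keysA (lbf : List (String × List (String × List (String × String)))) :
    (pyA_all_labels lbf).keys = PySem.Set.ofList ((pvOcc lbf).map (·.1)) := by
  rw [allA]
  rw [PySem.Dict.keys_foldl_modify_key]
  simp [PySem.Dict.keys_empty, PySem.Set.update_nil_left]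

theorem getDA (lbf : List (String × List (String × List (String × String)))) (x : String) :
    (pyA_all_labels lbf).getD x [] = ((pvOcc lbf).filter (fun o => o.1 == x)).map (·.2) := by
  rw [allA, PySem.Dict.getD_foldl_modify_append, PySem.Dict.getD_empty]
  simp
theorem itemsA (lbf : List (String × List (String × List (String × String)))) :
    (pyA_all_labels lbf).items
      = (PySem.Set.ofList ((pvOcc lbf).map (·.1))).map
          (fun x => (x, ((pvOcc lbf).filter (fun o => o.1 == x)).map (·.2))) := by
  have hnd : (pyA_all_labels lbf).keys.Nodup := by
    rw [keysA]; exact PySem.Set.nodup_ofList _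
  rw [PySem.Dict.items_eq_map_keys _ hnd ([] : List String), keysA]
  exact List.map_congr_left (fun x _ => by rw [getDA])

theorem cnt_len (lbf : List (String × List (String × List (String × String)))) (x : String) :
    (((pvOcc lbf).filter (fun o => o.1 == x)).map (·.2)).length
      = ((pvOcc lbf).map (·.1)).count x := by
  simp only [List.length_map, List.count, List.countP_map, ← List.countP_eq_length_filter,
    Function.comp_def]
theorem listA_eq_listB (lbf : List (String × List (String × List (String × String)))) :
    (((pyA_all_labels lbf).items.filter (fun it => decide (it.2.length = 1))).map
        (fun it => (it.2.headD "", it.1)))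
      = ((pvOcc lbf).filter (fun o => decide ((pyB_counts lbf).getD o.1 0 = 1))).map
          (fun o => (o.2, o.1)) := by
  rw [itemsA, List.filter_map, List.map_map]
  simp only [Function.comp_def]
  -- the length-1 test is the count-1 test on the flattened label list
  have hpred : ∀ x ∈ PySem.Set.ofList ((pvOcc lbf).map (·.1)),
      decide ((((pvOcc lbf).filter (fun o => o.1 == x)).map (·.2)).length = 1)
        = decide (((pvOcc lbf).map (·.1)).count x = 1) := by
    intro x _
    rw [cnt_len]
  rw [List.filter_congr hpred]
  -- dedup keeps count-1 labels in place
  rw [ofList_filter_count_one _ _ (fun x hx => le_of_eq (of_decide_eq_true hx))]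
  -- B's counter test is the same count-1 test
  have hpredB : ∀ o ∈ pvOcc lbf,
      decide ((pyB_counts lbf).getD o.1 0 = 1)
        = decide (((pvOcc lbf).map (·.1)).count o.1 = 1) := by
    intro o _
    rw [countsB]
    simp
  rw [List.filter_congr hpredB]
  -- the count-1 labels of the flattened list are the first components of the count-1 occurrences
  rw [List.filter_map, List.map_map]
  simp only [Function.comp_def]
  -- at a count-1 label the lone family in the group is the occurrence'"'"'s own family
  apply List.map_congr_left
  intro o ho
  have hmem := (List.mem_filter.mp ho).1
  have hcnt : ((pvOcc lbf).map (·.1)).count o.1 = 1 := of_decide_eq_true (List.mem_filter.mp ho).2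
  have hlen : ((pvOcc lbf).filter (fun p => p.1 == o.1)).length = 1 := by
    have h1 := cnt_len lbf o.1
    rw [List.length_map] at h1
    exact h1.trans hcnt
  obtain ⟨b, hb⟩ := List.length_eq_one_iff.mp hlen
  have hob : o ∈ (pvOcc lbf).filter (fun p => p.1 == o.1) := by
    rw [List.mem_filter]; exact ⟨hmem, by simp⟩
  rw [hb, List.mem_singleton] at hob
  rw [hb, hob]
  rfl
theorem main (lbf : List (String × List (String × List (String × String)))) :
    ((pyA_all_labels lbf).items.foldl
      (fun r it =>
        if it.2.length = 1 then
          let family := it.2.headD ""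
          let r := if r.contains family then r else r.insert family ([] : List String)
          r.insert family (r.getD family [] ++ [it.1])
        else r)
      PySem.Dict.empty).items
    = (lbf.foldl
        (fun r fam =>
          fam.2.foldl
            (fun r lbl =>
              if (pyB_counts lbf).getD lbl.1 0 = 1 then
                (r.setdefault fam.1 []).modify fam.1 [] (· ++ [lbl.1])
              else r)
            r)
        PySem.Dict.empty).items := by
  have hA : (fun (r : PySem.Dict String (List String)) (it : String × List String) =>
      if it.2.length = 1 then
        let family := it.2.headD ""
        let r := if r.contains family then r else r.insert family ([] : List String)
        r.insert family (r.getD family [] ++ [it.1])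
      else r)
    = (fun r it => if it.2.length = 1 then
        (fun (r : PySem.Dict String (List String)) (pr : String × String) =>
          r.modify pr.1 [] (· ++ [pr.2])) r (it.2.headD "", it.1) else r) := by
    funext r it
    by_cases h : it.2.length = 1
    · simp only [h, if_pos]
      exact abody r (it.2.headD "") it.1
    · simp [h]
  have hB : (fun (r : PySem.Dict String (List String)) (fam : String × List (String × List (String × String))) =>
      fam.2.foldl
        (fun r lbl =>
          if (pyB_counts lbf).getD lbl.1 0 = 1 then
            (r.setdefault fam.1 []).modify fam.1 [] (· ++ [lbl.1])
          else r)
        r)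
    = (fun r fam => ((fam.2.map (fun lbl => (lbl.1, fam.1))).foldl
        (fun r o => if (pyB_counts lbf).getD o.1 0 = 1 then
          (fun (r : PySem.Dict String (List String)) (pr : String × String) =>
            r.modify pr.1 [] (· ++ [pr.2])) r (o.2, o.1) else r) r)) := by
    funext r fam
    rw [List.foldl_map]
    congr 1
    funext r lbl
    by_cases h : (pyB_counts lbf).getD lbl.1 0 = 1
    · simp only [h, if_pos]
      exact bbody r fam.1 lbl.1
    · simp [h]
  rw [hA, hB]
  rw [foldl_if_filter _ _ (fun (it : String × List String) => (it.2.headD "", it.1))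
        (fun (r : PySem.Dict String (List String)) (pr : String × String) =>
          r.modify pr.1 [] (· ++ [pr.2]))]
  rw [foldl_inner]
  have hocc : lbf.flatMap (fun fam => fam.2.map (fun lbl => (lbl.1, fam.1))) = pvOcc lbf := rfl
  rw [hocc]
  rw [foldl_if_filter _ _ (fun (o : String × String) => (o.2, o.1))
        (fun (r : PySem.Dict String (List String)) (pr : String × String) =>
          r.modify pr.1 [] (· ++ [pr.2]))]
  rw [listA_eq_listB]

-- ===== VERDICT (by name: the statement is the Claim_ definition above) =====
theorem get_unique_labels_spec : Claim_equal_get_unique_labels := by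
  intro lbf _
  unfold Spec_get_unique_labels get_unique_labels get_unique_labels_alt
  exact main lbf
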